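-- pv_equiv track=rewrite | github.com/RishabhChangwani/FooBar | challenge3.1.py | solution
-- ===== SOURCE A (Python) =====
-- def findXOR(n):
--     mod = n % 4
--
--     if (mod == 0):
--         return n
--     elif (mod == 1):
--         return 1
--     elif (mod == 2):
--         return n + 1
--     elif (mod == 3):
--         return 0
--
-- def findXORFun(l, r):
--     return ((findXOR(l - 1) ^ findXOR(r)))
--
-- def solution(start, length):
--     if start >=0 and start + length**2 <= 2000000000 and length > 0:
--         xor_list = 0
--         for i in range(length):
--             istart = start+(i*length)
--             iend = istart+(length - 1 - i)
--             xor_list = xor_list^(findXORFun(istart,iend))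
--         return xor_list
-- ===== SOURCE B (Python) =====
-- def _countBit(n, b):
--     # how many integers in [0, n) have bit b set
--     block = 2 ** (b + 1)
--     half = 2 ** b
--     return (n // block) * half + max(0, (n % block) - half)
--
--
-- def solution(start, length):
--     if start >= 0 and start + length**2 <= 2000000000 and length > 0:
--         result = 0
--         for b in range(31):
--             cnt = 0
--             for i in range(length):
--                 lo = start + i * length
--                 hi = lo + (length - 1 - i)
--                 cnt = cnt + (_countBit(hi + 1, b) - _countBit(lo, b))
--             if cnt % 2 == 1:
--                 result = result + 2 ** b
--         return result
-- ===== Notes on version B (the rewrite author's own statement) =====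
-- stated objective: alternative
-- what changed: B computes each of the 31 answer bits independently: for every bit position it counts, via a closed-form population count over each row interval, how many covered integers have that bit set, and sets the bit iff the count is odd - no XOR range formula or XOR accumulation at all.
import Mathlib
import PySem

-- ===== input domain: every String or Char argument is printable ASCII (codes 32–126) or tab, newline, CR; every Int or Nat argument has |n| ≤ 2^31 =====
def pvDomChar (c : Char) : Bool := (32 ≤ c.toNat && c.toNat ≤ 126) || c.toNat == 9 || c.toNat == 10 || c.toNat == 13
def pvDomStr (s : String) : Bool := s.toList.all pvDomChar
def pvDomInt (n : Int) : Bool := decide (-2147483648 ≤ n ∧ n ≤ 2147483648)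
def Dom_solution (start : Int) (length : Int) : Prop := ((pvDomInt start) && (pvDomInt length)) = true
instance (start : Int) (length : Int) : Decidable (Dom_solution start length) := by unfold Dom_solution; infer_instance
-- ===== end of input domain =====

-- B computes each of the 31 answer bits independently, counting via a closed-form
-- population count how many covered integers have that bit set (bit set iff the
-- count is odd); A XOR-accumulates a mod-4 prefix-XOR formula per row.

-- ===== PORT A =====
def findXOR (n : Int) : Int :=
  let md := PySem.Int.mod n 4
  if md == 0 then n
  else if md == 1 then 1
  else if md == 2 then n + 1
  else 0

def findXORFun (l : Int) (r : Int) : Int :=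
  PySem.Int.bxor (findXOR (l - 1)) (findXOR r)

def solution (start : Int) (length : Int) : Option Int :=
  if start ≥ 0 ∧ start + length ^ 2 ≤ 2000000000 ∧ length > 0 then
    some ((PySem.List.pyRange 0 length 1).foldl
      (fun xor_list i =>
        let istart := start + i * length
        let iend := istart + (length - 1 - i)
        PySem.Int.bxor xor_list (findXORFun istart iend)) 0)
  else none

-- ===== PORT B =====
-- '2 ** (b + 1)' / '2 ** b' are ported as '(2:Int) ^ (…).toNat'; exact here since b ranges over range(31)
def countBit (n : Int) (b : Int) : Int :=
  let block := (2 : Int) ^ (b + 1).toNat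
  let half := (2 : Int) ^ b.toNat
  PySem.Int.floordiv n block * half + max 0 (PySem.Int.mod n block - half)

def solution_alt (start : Int) (length : Int) : Option Int :=
  if start ≥ 0 ∧ start + length ^ 2 ≤ 2000000000 ∧ length > 0 then
    some ((PySem.List.pyRange 0 31 1).foldl
      (fun result b =>
        let cnt := (PySem.List.pyRange 0 length 1).foldl
          (fun cnt i =>
            let lo := start + i * length
            let hi := lo + (length - 1 - i)
            cnt + (countBit (hi + 1) b - countBit lo b)) 0
        if PySem.Int.mod cnt 2 == 1 then result + (2 : Int) ^ b.toNat else result) 0)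
  else none

-- ===== PRECONDITION & SPEC =====
def Spec_solution (start : Int) (length : Int) (out : Option Int) : Prop := out = solution_alt start length
instance (start : Int) (length : Int) (out : Option Int) : Decidable (Spec_solution start length out) := by unfold Spec_solution; infer_instance

-- ===== CLAIM (what is proved, stated in full; the proofs are below) =====
def Claim_equal_solution : Prop := ∀ (start : Int) (length : Int), Dom_solution start length → Spec_solution start length (solution start length)

-- ===== LEMMAS AND PROOFS =====

-- Nat-level mirrors of the two computations
def segN (lo : Nat) : Nat → Nat
  | 0 => lo
  | k+1 => segN lo k ^^^ (lo + k + 1)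

def cbN (n b : Nat) : Nat := n / 2^(b+1) * 2^b + (n % 2^(b+1) - 2^b)

def bcN (n b : Nat) : Nat := (List.range n).countP (fun x => x.testBit b)

def natT (s L : Nat) : Nat :=
  (List.range L).foldl (fun acc i => acc ^^^ segN (s + i*L) (L - 1 - i)) 0

def natC (s L bb : Nat) : Nat :=
  (List.range L).foldl (fun c i => c + (bcN (s + i*L + (L - 1 - i) + 1) bb - bcN (s + i*L) bb)) 0

def natB (s L : Nat) : Nat :=
  (List.range 31).foldl (fun res bb => if natC s L bb % 2 = 1 then res + 2^bb else res) 0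

-- ---- counting lemmas ----

theorem cbN_succ (n b : Nat) : cbN (n+1) b = cbN n b + (if n.testBit b then 1 else 0) := by
  have hp : 0 < 2^b := Nat.two_pow_pos b
  have hQ : (2:Nat)^(b+1) = 2^b * 2 := by rw [pow_succ]
  unfold cbN
  rw [hQ]
  set p := (2:Nat)^b with hpdef
  have hbit : n.testBit b = decide (n % (p*2) / p = 1) := by
    rw [Nat.testBit_eq_decide_div_mod_eq, ← Nat.mod_mul_right_div_self n p 2]
  have hr : n % (p*2) < p*2 := Nat.mod_lt _ (by positivity)
  have hn : n = p*2 * (n / (p*2)) + n % (p*2) := (Nat.div_add_mod n (p*2)).symm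
  set q := n / (p*2) with hqdef
  set r := n % (p*2) with hrdef
  by_cases hcase : r + 1 < p*2
  · have hn1 : n + 1 = p*2 * q + (r+1) := by omega
    have hdiv : (n+1) / (p*2) = q := by
      rw [hn1, Nat.mul_add_div (by positivity), Nat.div_eq_of_lt hcase, Nat.add_zero]
    have hmod : (n+1) % (p*2) = r + 1 := by
      rw [hn1, Nat.mul_add_mod, Nat.mod_eq_of_lt hcase]
    rw [hdiv, hmod, hbit]
    by_cases hrp : p ≤ r
    · have h1 : r / p = 1 := Nat.div_eq_of_lt_le (by omega) (by omega)
      rw [h1]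
      norm_num
      omega
    · have h0 : r / p = 0 := Nat.div_eq_of_lt (by omega)
      rw [h0]
      norm_num
      omega
  · have hre : r + 1 = p*2 := by omega
    have hn1 : n + 1 = p*2 * (q+1) := by rw [mul_add, mul_one]; omega
    have hdiv : (n+1) / (p*2) = q + 1 := by
      rw [hn1, Nat.mul_div_cancel_left _ (by positivity)]
    have hmod : (n+1) % (p*2) = 0 := by rw [hn1]; exact Nat.mul_mod_right _ _
    have h1 : r / p = 1 := Nat.div_eq_of_lt_le (by omega) (by omega)
    rw [hdiv, hmod, hbit, h1, add_mul, one_mul]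
    norm_num
    omega

theorem bcN_succ (n b : Nat) : bcN (n+1) b = bcN n b + (if n.testBit b then 1 else 0) := by
  unfold bcN
  rw [List.range_succ, List.countP_append]
  congr 1
  by_cases h : n.testBit b <;> simp [List.countP, List.countP.go, h]

theorem cbN_eq_bcN (n b : Nat) : cbN n b = bcN n b := by
  induction n with
  | zero => simp [cbN, bcN]
  | succ m ih => rw [cbN_succ, bcN_succ, ih]

theorem bcN_mono {n m : Nat} (b : Nat) (h : n ≤ m) : bcN n b ≤ bcN m b :=
  List.Sublist.countP_le (List.range_sublist.mpr h)

theorem parity_add (x y : Nat) :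
    decide ((x+y) % 2 = 1) = (decide (x % 2 = 1) ^^ decide (y % 2 = 1)) := by
  by_cases hx : x % 2 = 1 <;> by_cases hy : y % 2 = 1 <;> simp [hx, hy] <;> omega

theorem segN_testBit (lo b : Nat) : ∀ k : Nat,
    (segN lo k).testBit b = decide ((bcN (lo + k + 1) b - bcN lo b) % 2 = 1) := by
  intro k
  induction k with
  | zero =>
    show lo.testBit b = _
    rw [bcN_succ]
    by_cases h : lo.testBit b <;> simp [h]
  | succ j ih =>
    have hm : bcN lo b ≤ bcN (lo + j + 1) b := bcN_mono b (by omega)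
    show (segN lo j ^^^ (lo + j + 1)).testBit b = _
    rw [Nat.testBit_xor, ih,
        show lo + (j+1) + 1 = (lo + j + 1) + 1 by omega, bcN_succ (lo+j+1) b,
        show bcN (lo+j+1) b + (if (lo+j+1).testBit b then 1 else 0) - bcN lo b
           = (bcN (lo+j+1) b - bcN lo b) + (if (lo+j+1).testBit b then 1 else 0) by omega]
    rw [show (decide (((bcN (lo+j+1) b - bcN lo b) + (if (lo+j+1).testBit b then 1 else 0)) % 2 = 1))
          = (decide ((bcN (lo+j+1) b - bcN lo b) % 2 = 1) ^^ decide ((if (lo+j+1).testBit b then 1 else 0) % 2 = 1))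
        from parity_add _ _]
    congr 1
    by_cases h : (lo+j+1).testBit b <;> simp [h]

theorem segN_lt (lo m : Nat) : ∀ k : Nat, lo + k < 2^m → segN lo k < 2^m := by
  intro k
  induction k with
  | zero => intro h; exact h
  | succ j ih =>
    intro h
    exact Nat.xor_lt_two_pow (ih (by omega)) (by omega)

-- ---- fold composition lemmas (Nat level) ----

theorem natT_testBit_aux (lo k : Nat → Nat) (b : Nat) : ∀ n : Nat,
    ((List.range n).foldl (fun acc i => acc ^^^ segN (lo i) (k i)) 0).testBit b
      = decide (((List.range n).foldl (fun c i => c + (bcN (lo i + k i + 1) b - bcN (lo i) b)) 0) % 2 = 1) := by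
  intro n
  induction n with
  | zero => simp
  | succ m ih =>
    rw [List.range_succ, List.foldl_append, List.foldl_append]
    simp only [List.foldl_cons, List.foldl_nil]
    rw [Nat.testBit_xor, ih, segN_testBit]
    exact (parity_add _ _).symm

theorem foldl_xor_lt (lo k : Nat → Nat) (m : Nat) : ∀ n : Nat,
    (∀ i, i < n → lo i + k i < 2^m) →
    (List.range n).foldl (fun acc i => acc ^^^ segN (lo i) (k i)) 0 < 2^m := by
  intro n
  induction n with
  | zero => intro _; simp
  | succ j ih =>
    intro h
    rw [List.range_succ, List.foldl_append]
    simp only [List.foldl_cons, List.foldl_nil]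
    exact Nat.xor_lt_two_pow (ih (fun i hi => h i (by omega)))
      (segN_lt _ m _ (h j (by omega)))

-- bit reconstruction: summing 2^b over set bits of T below m recovers T % 2^m
theorem bits_recon (T : Nat) : ∀ (m : Nat) (a : Nat),
    (List.range m).foldl (fun res bb => if T.testBit bb then res + 2^bb else res) a
      = a + T % 2^m := by
  intro m
  induction m with
  | zero => intro a; simp [Nat.mod_one]
  | succ j ih =>
    intro a
    rw [List.range_succ, List.foldl_append]
    simp only [List.foldl_cons, List.foldl_nil]
    have hms : T % 2^(j+1) = T % 2^j + 2^j * (T / 2^j % 2) := Nat.mod_pow_succ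
    rw [Nat.testBit_eq_decide_div_mod_eq]
    by_cases h : T / 2^j % 2 = 1
    · rw [if_pos (by simpa using h), ih]
      rw [h] at hms
      omega
    · have h0 : T / 2^j % 2 = 0 := by omega
      rw [if_neg (by simp [h0]), ih]
      rw [h0] at hms
      omega

-- ---- the central Nat-level equivalence ----

theorem natB_eq_natT (s L : Nat) (hB : s + L*L ≤ 2000000000) : natB s L = natT s L := by
  have hrow : ∀ i, i < L → (s + i*L) + (L - 1 - i) < 2^31 := by
    intro i hi
    have h2 : (i+1) * L ≤ L * L := Nat.mul_le_mul_right _ hi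
    rw [add_mul, one_mul] at h2
    omega
  have hT : natT s L < 2^31 := foldl_xor_lt _ _ 31 L hrow
  have hbit : ∀ bb, decide (natC s L bb % 2 = 1) = (natT s L).testBit bb := by
    intro bb
    exact (natT_testBit_aux (fun i => s + i*L) (fun i => L - 1 - i) bb L).symm
  unfold natB
  rw [PySem.List.foldl_congr_mem _ _
      (fun res bb => if (natT s L).testBit bb then res + 2^bb else res) _
      (by
        intro res bb _
        show (if natC s L bb % 2 = 1 then res + 2^bb else res)
           = (if (natT s L).testBit bb then res + 2^bb else res)
        rw [← hbit bb]
        simp)]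
  rw [bits_recon, Nat.zero_add, Nat.mod_eq_of_lt hT]

-- ---- Int ↔ Nat bridges ----

theorem pv_nat_even_xor_one (m : Nat) (h : m % 2 = 0) : m ^^^ 1 = m + 1 := by
  apply Nat.eq_of_testBit_eq
  intro i
  cases i with
  | zero => simp [Nat.testBit_zero, Nat.succ_mod_two_eq_one_iff.mpr h]
  | succ j =>
    have h2 : (m + 1) / 2 = m / 2 := by omega
    simp [Nat.testBit_succ, h2, Nat.xor_div_two]

theorem pv_findXOR_step (n : Int) (h : -1 ≤ n) :
    findXOR (n + 1) = PySem.Int.bxor (findXOR n) (n + 1) := by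
  rcases eq_or_lt_of_le h with h1 | h1
  · rw [← h1]; decide
  · obtain ⟨m, rfl⟩ := Int.eq_ofNat_of_zero_le (by omega : (0:Int) ≤ n)
    have e1 : ((m : Int) + 1) = ((m + 1 : Nat) : Int) := by push_cast; ring
    have hc : ∀ a : Nat, PySem.Int.mod ((a : Nat) : Int) 4 = ((a % 4 : Nat) : Int) := by
      intro a
      rw [show (4:Int) = ((4:Nat) : Int) by norm_num, PySem.Int.mod_natCast]
    have hm4 : m % 4 = 0 ∨ m % 4 = 1 ∨ m % 4 = 2 ∨ m % 4 = 3 := by omega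
    simp only [findXOR, e1, hc, beq_iff_eq]
    rcases hm4 with h4 | h4 | h4 | h4
    · have d1 : (m + 1) % 4 = 1 := by omega
      rw [h4, d1]
      norm_num
      rw [e1, PySem.Int.bxor_natCast, ← pv_nat_even_xor_one m (by omega), ← Nat.xor_assoc,
          Nat.xor_self, Nat.zero_xor]
      norm_num
    · have d1 : (m + 1) % 4 = 2 := by omega
      rw [h4, d1]
      norm_num
      have hb := PySem.Int.bxor_natCast 1 (m + 1)
      push_cast at hb
      rw [hb, Nat.xor_comm, pv_nat_even_xor_one (m + 1) (by omega)]
      push_cast; ring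
    · have d1 : (m + 1) % 4 = 3 := by omega
      rw [h4, d1]
      norm_num
    · have d1 : (m + 1) % 4 = 0 := by omega
      rw [h4, d1]
      norm_num
      rw [PySem.Int.bxor_comm, PySem.Int.bxor_zero]

theorem pv_findXOR_nonneg (n : Int) (h : -1 ≤ n) : 0 ≤ findXOR n := by
  have hfm := PySem.Int.floordiv_mul_add_mod n 4
  have hnn := PySem.Int.mod_nonneg n (b := 4) (by norm_num)
  simp only [findXOR, beq_iff_eq]
  split_ifs with h0 h1 h2 <;> omega

theorem findXORFun_cast (lo : Nat) : ∀ k : Nat,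
    findXORFun (lo : Int) ((lo : Int) + (k : Int)) = ((segN lo k : Nat) : Int) := by
  intro k
  induction k with
  | zero =>
    show PySem.Int.bxor (findXOR ((lo:Int) - 1)) (findXOR ((lo:Int) + ((0:Nat):Int))) = _
    rw [show ((lo:Int) + ((0:Nat):Int)) = (lo:Int) by push_cast; ring]
    have hs := pv_findXOR_step ((lo:Int) - 1) (by omega)
    rw [show (lo:Int) - 1 + 1 = (lo:Int) by ring] at hs
    rw [hs]
    obtain ⟨a, ha⟩ := Int.eq_ofNat_of_zero_le (pv_findXOR_nonneg ((lo:Int) - 1) (by omega))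
    rw [ha]
    simp only [PySem.Int.bxor_natCast]
    rw [show (segN lo 0) = lo from rfl, ← Nat.xor_assoc, Nat.xor_self, Nat.zero_xor]
  | succ j ih =>
    have hs := pv_findXOR_step ((lo:Int) + (j:Int)) (by omega)
    obtain ⟨A, hA⟩ := Int.eq_ofNat_of_zero_le (pv_findXOR_nonneg ((lo:Int) - 1) (by omega))
    obtain ⟨B, hB2⟩ := Int.eq_ofNat_of_zero_le (pv_findXOR_nonneg ((lo:Int) + (j:Int)) (by omega))
    have hAB : A ^^^ B = segN lo j := by
      have hih := ih
      rw [show findXORFun (lo:Int) ((lo:Int)+(j:Int))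
            = PySem.Int.bxor (findXOR ((lo:Int)-1)) (findXOR ((lo:Int)+(j:Int))) from rfl,
          hA, hB2, PySem.Int.bxor_natCast] at hih
      exact_mod_cast hih
    show PySem.Int.bxor (findXOR ((lo:Int) - 1)) (findXOR ((lo:Int) + ((j+1 : Nat) : Int))) = _
    rw [show ((lo:Int) + ((j+1 : Nat):Int)) = ((lo:Int) + (j:Int)) + 1 by push_cast; ring, hs,
        hA, hB2,
        show ((lo:Int) + (j:Int)) + 1 = ((lo + j + 1 : Nat) : Int) by push_cast; ring,
        PySem.Int.bxor_natCast, PySem.Int.bxor_natCast,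
        show segN lo (j+1) = segN lo j ^^^ (lo+j+1) from rfl, ← hAB, Nat.xor_assoc]

theorem countBit_cast (n bb : Nat) : countBit (n : Int) (bb : Int) = ((cbN n bb : Nat) : Int) := by
  simp only [countBit, cbN]
  rw [show (((bb:Int) + 1)).toNat = bb + 1 by omega, show ((bb:Int)).toNat = bb by omega,
      show ((2:Int) ^ (bb+1)) = (((2^(bb+1) : Nat)) : Int) by push_cast; ring,
      show ((2:Int) ^ bb) = (((2^bb : Nat)) : Int) by push_cast; ring,
      PySem.Int.floordiv_natCast, PySem.Int.mod_natCast,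
      show (max 0 ((((n % 2^(bb+1)) : Nat) : Int) - ((2^bb : Nat) : Int)))
         = (((n % 2^(bb+1) - 2^bb : Nat)) : Int) by omega,
      show (((n / 2^(bb+1) : Nat)) : Int) * (((2^bb : Nat)) : Int)
         = (((n / 2^(bb+1) * 2^bb : Nat)) : Int) by push_cast; ring]
  push_cast
  ring

-- generic cast-transport lemmas for the three fold shapes
theorem foldl_bxor_cast (g : Nat → Nat) (l : List Nat) : ∀ a : Nat,
    l.foldl (fun acc k => PySem.Int.bxor acc ((g k : Nat) : Int)) ((a : Nat) : Int)
      = ((l.foldl (fun acc k => acc ^^^ g k) a : Nat) : Int) := by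
  induction l with
  | nil => intro a; rfl
  | cons x xs ih =>
    intro a
    simp only [List.foldl_cons, PySem.Int.bxor_natCast]
    exact ih _

theorem foldl_addsub_cast (f g : Nat → Nat) (l : List Nat) (h : ∀ k ∈ l, g k ≤ f k) : ∀ a : Nat,
    l.foldl (fun c k => c + (((f k : Nat) : Int) - ((g k : Nat) : Int))) ((a : Nat) : Int)
      = ((l.foldl (fun c k => c + (f k - g k)) a : Nat) : Int) := by
  induction l with
  | nil => intro a; rfl
  | cons x xs ih =>
    intro a
    simp only [List.foldl_cons]
    have hx : g x ≤ f x := h x (List.mem_cons_self)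
    rw [show ((a:Nat):Int) + (((f x : Nat):Int) - ((g x : Nat):Int))
          = (((a + (f x - g x) : Nat)):Int) by omega]
    exact ih (fun k hk => h k (List.mem_cons_of_mem _ hk)) _

theorem foldl_ite_add_cast (P : Nat → Prop) [DecidablePred P] (g : Nat → Nat) (l : List Nat) :
    ∀ a : Nat,
    l.foldl (fun (res : Int) k => if P k then res + ((g k : Nat) : Int) else res) ((a : Nat) : Int)
      = ((l.foldl (fun res k => if P k then res + g k else res) a : Nat) : Int) := by
  induction l with
  | nil => intro a; rfl
  | cons x xs ih =>
    intro a
    simp only [List.foldl_cons]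
    by_cases h : P x
    · rw [if_pos h, if_pos h, show ((a:Nat):Int) + ((g x : Nat):Int) = (((a + g x : Nat)):Int) by push_cast; ring]
      exact ih _
    · rw [if_neg h, if_neg h]
      exact ih _

-- ===== VERDICT (by name: the statement is the Claim_ definition above) =====
theorem solution_spec : Claim_equal_solution := by
  intro start length _
  unfold Spec_solution solution solution_alt
  split_ifs with hg
  · obtain ⟨h0, hbound, hlen⟩ := hg
    obtain ⟨s, rfl⟩ := Int.eq_ofNat_of_zero_le h0
    obtain ⟨L, rfl⟩ := Int.eq_ofNat_of_zero_le (le_of_lt hlen)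
    have hLpos : 0 < L := by exact_mod_cast hlen
    have hB : s + L * L ≤ 2000000000 := by
      rw [show ((L:Int))^2 = ((L*L : Nat) : Int) by push_cast; ring] at hbound
      exact_mod_cast hbound
    congr 1
    -- A side equals ↑(natT s L)
    have hAside : (PySem.List.pyRange 0 (L:Int) 1).foldl
        (fun xor_list i =>
          let istart := (s:Int) + i * (L:Int)
          let iend := istart + ((L:Int) - 1 - i)
          PySem.Int.bxor xor_list (findXORFun istart iend)) 0 = ((natT s L : Nat) : Int) := by
      rw [PySem.List.pyRange_zero_natCast, List.foldl_map]
      rw [PySem.List.foldl_congr_mem _ _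
          (fun (acc : Int) (i : Nat) => PySem.Int.bxor acc ((segN (s + i*L) (L - 1 - i) : Nat) : Int)) _
          (by
            intro acc i hi
            have hiL : i < L := List.mem_range.mp hi
            show PySem.Int.bxor acc (findXORFun ((s:Int) + (i:Int) * (L:Int))
              ((s:Int) + (i:Int) * (L:Int) + ((L:Int) - 1 - (i:Int)))) = _
            have hsub : (((L - 1 - i : Nat)) : Int) = (L:Int) - 1 - (i:Int) := by omega
            rw [show ((s:Int) + (i:Int) * (L:Int) + ((L:Int) - 1 - (i:Int)))
                  = (((s + i*L : Nat)) : Int) + (((L - 1 - i : Nat)) : Int) by rw [hsub]; push_cast; ring,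
                show ((s:Int) + (i:Int) * (L:Int)) = (((s + i*L : Nat)) : Int) by push_cast; ring,
                findXORFun_cast])]
      rw [show (0 : Int) = (((0:Nat)) : Int) from rfl, foldl_bxor_cast]
      rfl
    -- B side equals ↑(natB s L)
    have hcnt : ∀ bb : Nat, (PySem.List.pyRange 0 (L:Int) 1).foldl
        (fun cnt i =>
          let lo := (s:Int) + i * (L:Int)
          let hi := lo + ((L:Int) - 1 - i)
          cnt + (countBit (hi + 1) (bb:Int) - countBit lo (bb:Int))) 0
        = ((natC s L bb : Nat) : Int) := by
      intro bb
      rw [PySem.List.pyRange_zero_natCast, List.foldl_map]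
      rw [PySem.List.foldl_congr_mem _ _
          (fun (c : Int) (i : Nat) =>
            c + (((bcN (s + i*L + (L - 1 - i) + 1) bb : Nat) : Int)
               - ((bcN (s + i*L) bb : Nat) : Int))) _
          (by
            intro c i hi
            have hiL : i < L := List.mem_range.mp hi
            show c + (countBit ((s:Int) + (i:Int) * (L:Int) + ((L:Int) - 1 - (i:Int)) + 1) (bb:Int)
                    - countBit ((s:Int) + (i:Int) * (L:Int)) (bb:Int)) = _
            have hsub : (((L - 1 - i : Nat)) : Int) = (L:Int) - 1 - (i:Int) := by omega
            rw [show ((s:Int) + (i:Int) * (L:Int) + ((L:Int) - 1 - (i:Int)) + 1)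
                  = (((s + i*L + (L - 1 - i) + 1 : Nat)) : Int) by rw [← hsub]; push_cast; ring,
                show ((s:Int) + (i:Int) * (L:Int)) = (((s + i*L : Nat)) : Int) by push_cast; ring,
                countBit_cast, countBit_cast, cbN_eq_bcN, cbN_eq_bcN])]
      rw [show (0 : Int) = (((0:Nat)) : Int) from rfl,
          foldl_addsub_cast _ _ _ (fun i _ => bcN_mono bb (by omega))]
      rfl
    have hBside : (PySem.List.pyRange 0 (31:Int) 1).foldl
        (fun result b =>
          let cnt := (PySem.List.pyRange 0 (L:Int) 1).foldl
            (fun cnt i =>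
              let lo := (s:Int) + i * (L:Int)
              let hi := lo + ((L:Int) - 1 - i)
              cnt + (countBit (hi + 1) b - countBit lo b)) 0
          if PySem.Int.mod cnt 2 == 1 then result + (2:Int) ^ b.toNat else result) 0
        = ((natB s L : Nat) : Int) := by
      rw [show (31:Int) = (((31:Nat)) : Int) by norm_num, PySem.List.pyRange_zero_natCast 31,
          List.foldl_map]
      rw [PySem.List.foldl_congr_mem _ _
          (fun (res : Int) (bb : Nat) =>
            if natC s L bb % 2 = 1 then res + ((2^bb : Nat) : Int) else res) _
          (by
            intro res bb _
            show (if PySem.Int.mod ((PySem.List.pyRange 0 (L:Int) 1).foldl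
                (fun cnt i =>
                  let lo := (s:Int) + i * (L:Int)
                  let hi := lo + ((L:Int) - 1 - i)
                  cnt + (countBit (hi + 1) (bb:Int) - countBit lo (bb:Int))) 0) 2 == 1
              then res + (2:Int) ^ ((bb:Int)).toNat else res)
              = (if natC s L bb % 2 = 1 then res + ((2^bb : Nat) : Int) else res)
            rw [hcnt bb, show ((bb:Int)).toNat = bb by omega,
                show PySem.Int.mod (((natC s L bb : Nat)) : Int) 2
                   = (((natC s L bb % 2 : Nat)) : Int) from PySem.Int.mod_natCast _ 2,
                show ((2:Int) ^ bb) = (((2^bb : Nat)) : Int) by push_cast; ring]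
            by_cases h : natC s L bb % 2 = 1
            · rw [if_pos (by simp [h]), if_pos h]
            · have h0 : natC s L bb % 2 = 0 := by omega
              rw [if_neg (by simp [h0]), if_neg h])]
      rw [show (0 : Int) = (((0:Nat)) : Int) from rfl,
          foldl_ite_add_cast (fun bb => natC s L bb % 2 = 1) (fun bb => 2^bb)]
      rfl
    rw [hAside, hBside]
    exact_mod_cast (natB_eq_natT s L hB).symm
  · rfl
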